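-- pv_equiv track=rewrite | github.com/SeanDictionary/SageMath-for-VScode | server/lsp.py | encode_tokens
-- ===== SOURCE A (Python) =====
-- def encode_tokens(tokens):
--     result = []
--     prev_line = 0
--     prev_char = 0
--     for line, char, length, token_type, token_modifiers in sorted(tokens):
--         delta_line = line - prev_line
--         delta_start = char - prev_char if delta_line == 0 else char
--         result += [delta_line, delta_start, length, token_type, token_modifiers]
--         prev_line = line
--         prev_char = char
--     return result
-- ===== SOURCE B (Python) =====
-- def encode_tokens(tokens):
--     # Group the sorted tokens into runs of consecutive equal lines: the run head
--     # always emits its absolute char (no branch needed), run members emit the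
--     # char difference to their left neighbour with delta_line = 0.
--     s = sorted(tokens)
--     out = []
--     prev_line = 0
--     i, n = 0, len(s)
--     while i < n:
--         line, char, length, token_type, token_modifiers = s[i]
--         out += [line - prev_line, char, length, token_type, token_modifiers]
--         j = i + 1
--         while j < n and s[j][0] == line:
--             out += [0, s[j][1] - s[j - 1][1], s[j][2], s[j][3], s[j][4]]
--             j += 1
--         prev_line = line
--         i = j
--     return out
-- ===== Notes on version B (the rewrite author's own statement) =====
-- stated objective: alternative
-- what changed: B groups the sorted tokens into runs of consecutive equal lines (nested loops) and eliminates A's delta_start conditional and prev_char accumulator entirely: each run head emits its absolute char (correct because the previous run has a different line, or the run is first and prev_char is 0), and run members emit the char difference to their left neighbour with delta_line fixed to 0.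
import Mathlib
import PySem

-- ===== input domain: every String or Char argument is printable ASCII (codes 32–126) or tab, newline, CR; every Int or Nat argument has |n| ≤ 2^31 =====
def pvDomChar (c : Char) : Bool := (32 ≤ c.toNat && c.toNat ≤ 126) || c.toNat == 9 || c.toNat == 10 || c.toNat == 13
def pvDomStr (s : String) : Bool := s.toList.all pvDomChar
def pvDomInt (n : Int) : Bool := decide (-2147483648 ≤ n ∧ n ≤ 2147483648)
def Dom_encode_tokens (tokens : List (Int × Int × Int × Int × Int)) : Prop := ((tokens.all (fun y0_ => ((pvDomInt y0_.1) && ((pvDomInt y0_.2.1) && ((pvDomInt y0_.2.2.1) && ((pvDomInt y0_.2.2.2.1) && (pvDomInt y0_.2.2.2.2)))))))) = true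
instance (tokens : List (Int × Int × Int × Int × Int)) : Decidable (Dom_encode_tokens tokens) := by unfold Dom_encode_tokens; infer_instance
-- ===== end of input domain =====

-- B groups the sorted tokens into runs of equal lines, eliminating A's delta_start branch
-- and prev_char accumulator (objective: alternative decomposition, same cost).

-- Python's lexicographic order on the 5-tuples, as an injective key into a Lex product
-- (Mathlib's plain Prod '<' is NOT lexicographic); used by both ports' sorted() call.
def pvKey5 (t : Int × Int × Int × Int × Int) : Int ×ₗ (Int ×ₗ (Int ×ₗ (Int ×ₗ Int))) :=
  toLex (t.1, toLex (t.2.1, toLex (t.2.2.1, toLex (t.2.2.2.1, t.2.2.2.2))))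

-- ===== PORT A =====
-- the loop body: state = (result, prev_line, prev_char)
def pvStepA (st : List Int × Int × Int) (t : Int × Int × Int × Int × Int) :
    List Int × Int × Int :=
  match st, t with
  | (result, prev_line, prev_char), (line, char, length, token_type, token_modifiers) =>
    let delta_line := line - prev_line
    let delta_start := if delta_line == 0 then char - prev_char else char
    (result ++ [delta_line, delta_start, length, token_type, token_modifiers], line, char)

def encode_tokens (tokens : List (Int × Int × Int × Int × Int)) : List Int :=
  ((PySem.List.sorted tokens pvKey5 false).foldl pvStepA ([], 0, 0)).1

-- ===== PORT B =====
-- B's inner while-loop: the tail of a same-line run, each member paired with its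
-- left neighbour's char (s[j][1] - s[j-1][1]), delta_line fixed to 0
def pvRun (leftChar : Int) : List (Int × Int × Int × Int × Int) → List Int
  | [] => []
  | u :: us => [0, u.2.1 - leftChar, u.2.2.1, u.2.2.2.1, u.2.2.2.2] ++ pvRun u.2.1 us

-- B's outer while-loop: peel one run of consecutive equal lines at a time;
-- the run head emits its absolute char
def pvRuns (prev_line : Int) (s : List (Int × Int × Int × Int × Int)) : List Int :=
  match s with
  | [] => []
  | t :: rest =>
    [t.1 - prev_line, t.2.1, t.2.2.1, t.2.2.2.1, t.2.2.2.2]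
      ++ pvRun t.2.1 (rest.takeWhile (fun u => u.1 == t.1))
      ++ pvRuns t.1 (rest.dropWhile (fun u => u.1 == t.1))
termination_by s.length
decreasing_by
  simp only [List.length_cons]
  exact Nat.lt_succ_of_le (List.length_dropWhile_le _ _)

def encode_tokens_alt (tokens : List (Int × Int × Int × Int × Int)) : List Int :=
  pvRuns 0 (PySem.List.sorted tokens pvKey5 false)

-- ===== PRECONDITION & SPEC =====
def Spec_encode_tokens (tokens : List (Int × Int × Int × Int × Int)) (out : List Int) : Prop := out = encode_tokens_alt tokens
instance (tokens : List (Int × Int × Int × Int × Int)) (out : List Int) : Decidable (Spec_encode_tokens tokens out) := by unfold Spec_encode_tokens; infer_instance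

-- ===== CLAIM (what is proved, stated in full; the proofs are below) =====
def Claim_equal_encode_tokens : Prop := ∀ (tokens : List (Int × Int × Int × Int × Int)), Dom_encode_tokens tokens → Spec_encode_tokens tokens (encode_tokens tokens)

-- ===== LEMMAS AND PROOFS =====

-- the char of the last element of a run, seen from A's running prev_char
def pvLC (pc : Int) : List (Int × Int × Int × Int × Int) → Int
  | [] => pc
  | u :: us => pvLC u.2.1 us

-- A's fold over a run whose lines all equal prev_line = B's run tail
lemma pv_run_fold (g : List (Int × Int × Int × Int × Int)) (pl : Int) :
    ∀ acc pc, (∀ u ∈ g, u.1 = pl) →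
    g.foldl pvStepA (acc, pl, pc) = (acc ++ pvRun pc g, pl, pvLC pc g) := by
  induction g with
  | nil => intro acc pc _; simp [pvLC, pvRun]
  | cons u us ih =>
    intro acc pc hg
    obtain ⟨l, c, len, tt, tm⟩ := u
    have hl : l = pl := hg _ (List.mem_cons_self ..)
    simp only [List.foldl_cons, pvStepA, hl, sub_self]
    rw [ih _ c (fun v hv => hg v (List.mem_cons_of_mem _ hv))]
    simp [pvRun, pvLC]

-- if dropWhile produces a cons, its head fails the predicate
lemma pv_dropWhile_head {α : Type} (p : α → Bool) (l : List α) (x : α)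
    (xs : List α) (h : l.dropWhile p = x :: xs) : p x = false := by
  induction l with
  | nil => simp at h
  | cons a as ih =>
    by_cases hp : p a
    · exact ih (by simpa [List.dropWhile_cons, hp] using h)
    · simp [hp] at h
      simpa [h.1] using hp

-- main invariant: A's fold = acc ++ B's run loop, whenever the head of the
-- remaining list starts a new line relative to pl (or prev_char is still 0)
lemma pv_main : ∀ n (s : List (Int × Int × Int × Int × Int)), s.length ≤ n →
    ∀ pl pc acc, (∀ t ∈ s.head?, t.1 ≠ pl ∨ pc = 0) →
    (s.foldl pvStepA (acc, pl, pc)).1 = acc ++ pvRuns pl s := by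
  intro n
  induction n with
  | zero =>
    intro s hs
    have h0 : s = [] := List.length_eq_zero_iff.mp (Nat.le_zero.mp hs)
    subst h0
    intro pl pc acc _
    rw [pvRuns]
    simp
  | succ m ih =>
    intro s hs pl pc acc hhead
    cases s with
    | nil => rw [pvRuns]; simp
    | cons t rest =>
      obtain ⟨l, c, len, tt, tm⟩ := t
      have hcond := hhead (l, c, len, tt, tm) (by simp)
      have hds : (if l - pl == 0 then c - pc else c) = c := by
        rcases hcond with h | h
        · have : (l - pl == 0) = false := by simp; omega
          simp [this]
        · by_cases hlp : l - pl = 0 <;> simp [hlp, h]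
      simp only [List.foldl_cons, pvStepA, hds]
      have hsplit : rest = rest.takeWhile (fun u => u.1 == l) ++ rest.dropWhile (fun u => u.1 == l) :=
        (List.takeWhile_append_dropWhile ..).symm
      rw [hsplit, List.foldl_append]
      rw [pv_run_fold _ l _ c (fun u hu => by simpa using List.mem_takeWhile_imp hu)]
      rw [ih (rest.dropWhile (fun u => u.1 == l))
            (le_trans (List.length_dropWhile_le ..) (by simpa using hs))
            l (pvLC c (rest.takeWhile (fun u => u.1 == l))) _
            (by
              intro u hu
              match hdw : rest.dropWhile (fun u => u.1 == l) with
              | [] => simp [hdw] at hu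
              | x :: xs =>
                rw [hdw] at hu
                simp at hu
                left
                have := pv_dropWhile_head _ _ _ _ hdw
                simp at this
                simpa [hu] using this)]
      conv_rhs => rw [pvRuns]
      simp

-- ===== VERDICT (by name: the statement is the Claim_ definition above) =====
theorem encode_tokens_spec : Claim_equal_encode_tokens := by
  intro tokens _
  unfold Spec_encode_tokens encode_tokens encode_tokens_alt
  exact pv_main _ _ le_rfl 0 0 [] (fun _ _ => Or.inr rfl)
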